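-- pv_equiv track=rewrite | github.com/DigitalAppsofc/Proxy_scan1 | proxy_scanner.py | generate_ips
-- ===== SOURCE A (Python) =====
-- def generate_ips(base_ip):
--     parts = [p for p in base_ip.strip().split('.') if p]
--     ips = []
--     if len(parts) >= 4: return ['.'.join(parts[:4])]
--     elif len(parts) == 3:
--         base = '.'.join(parts)
--         for i in range(256): ips.append(f"{base}.{i}")
--     elif len(parts) == 2:
--         base = '.'.join(parts)
--         for i in range(256):
--             for j in range(256): ips.append(f"{base}.{i}.{j}")
--     elif len(parts) == 1:
--         base = f"{parts[0]}.0"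
--         for i in range(256):
--             for j in range(256): ips.append(f"{base}.{i}.{j}")
--     return ips
-- ===== SOURCE B (Python) =====
-- def generate_ips(base_ip):
--     parts = [p for p in base_ip.strip().split('.') if p]
--     if len(parts) >= 4:
--         return ['.'.join(parts[:4])]
--     if not parts:
--         return []
--     prefix = parts if len(parts) > 1 else [parts[0], '0']
--     combos = [[]]
--     for _ in range(4 - len(prefix)):
--         combos = [c + [str(x)] for c in combos for x in range(256)]
--     return ['.'.join(prefix + c) for c in combos]
-- ===== Notes on version B (the rewrite author's own statement) =====
-- stated objective: simpler
-- what changed: B replaces A's four branch-specific hand-written enumeration loops by one parametrized scheme: it computes a prefix list and the number of free octets, builds all octet combinations by repeated cartesian extension of a combo list, and joins prefix+combo once, instead of A's separate 1- and 2-deep nested append loops per branch.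
import Mathlib
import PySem

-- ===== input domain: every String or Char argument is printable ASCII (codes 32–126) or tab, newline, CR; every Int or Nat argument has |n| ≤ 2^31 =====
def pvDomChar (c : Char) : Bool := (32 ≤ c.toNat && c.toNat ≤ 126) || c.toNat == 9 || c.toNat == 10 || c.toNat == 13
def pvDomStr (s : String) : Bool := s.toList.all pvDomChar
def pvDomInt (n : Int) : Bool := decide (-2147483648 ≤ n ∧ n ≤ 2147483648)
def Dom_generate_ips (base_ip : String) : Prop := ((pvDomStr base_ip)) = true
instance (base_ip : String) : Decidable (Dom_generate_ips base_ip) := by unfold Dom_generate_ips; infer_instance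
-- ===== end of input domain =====

-- B replaces A's four hand-written branch loops by one prefix + repeated-cartesian-extension enumeration (objective: simpler).

-- ===== PORT A =====
-- split? with separator "." is exact here: the separator is nonempty, so it never returns none.
def generate_ips (base_ip : String) : List String :=
  let parts := ((PySem.Str.split? (PySem.Str.strip base_ip) ".").getD []).filter (fun p => p != "")
  let ips : List String := []
  if parts.length ≥ 4 then [PySem.Str.join "." (PySem.List.slice parts none (some 4))]
  else if parts.length = 3 then
    let base := PySem.Str.join "." parts
    (PySem.List.pyRange 0 256 1).foldl (fun ips i => ips ++ [base ++ "." ++ PySem.Int.toStr i]) ips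
  else if parts.length = 2 then
    let base := PySem.Str.join "." parts
    (PySem.List.pyRange 0 256 1).foldl (fun ips i =>
      (PySem.List.pyRange 0 256 1).foldl
        (fun ips j => ips ++ [base ++ "." ++ PySem.Int.toStr i ++ "." ++ PySem.Int.toStr j]) ips) ips
  else if parts.length = 1 then
    let base := PySem.List.pyGetD parts 0 "" ++ ".0"   -- parts[0]: in range, the branch guarantees length 1
    (PySem.List.pyRange 0 256 1).foldl (fun ips i =>
      (PySem.List.pyRange 0 256 1).foldl
        (fun ips j => ips ++ [base ++ "." ++ PySem.Int.toStr i ++ "." ++ PySem.Int.toStr j]) ips) ips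
  else ips

-- ===== PORT B =====
def generate_ips_alt (base_ip : String) : List String :=
  let parts := ((PySem.Str.split? (PySem.Str.strip base_ip) ".").getD []).filter (fun p => p != "")
  if parts.length ≥ 4 then [PySem.Str.join "." (PySem.List.slice parts none (some 4))]
  else if parts.isEmpty then []
  else
    let pre := if parts.length > 1 then parts else [PySem.List.pyGetD parts 0 "", "0"]
    let combos := (PySem.List.pyRange 0 (4 - (pre.length : Int)) 1).foldl
      (fun combos _ => combos.flatMap
        (fun c => (PySem.List.pyRange 0 256 1).map (fun x => c ++ [PySem.Int.toStr x]))) [[]]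
    combos.map (fun c => PySem.Str.join "." (pre ++ c))

-- ===== PRECONDITION & SPEC =====
def Spec_generate_ips (base_ip : String) (out : List String) : Prop := out = generate_ips_alt base_ip
instance (base_ip : String) (out : List String) : Decidable (Spec_generate_ips base_ip out) := by unfold Spec_generate_ips; infer_instance

-- ===== CLAIM (what is proved, stated in full; the proofs are below) =====
def Claim_equal_generate_ips : Prop := ∀ (base_ip : String), Dom_generate_ips base_ip → Spec_generate_ips base_ip (generate_ips base_ip)

-- ===== LEMMAS AND PROOFS =====

-- '.'-join of a nonempty list with one element appended, on the char level
theorem pv_chars_join_snoc (sep : List Char) (p : List (List Char)) (hp : p ≠ []) (x : List Char) :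
    PySem.Chars.join sep (p ++ [x]) = PySem.Chars.join sep p ++ sep ++ x := by
  induction p with
  | nil => exact absurd rfl hp
  | cons a q ih =>
    cases q with
    | nil => simp [PySem.Chars.join_cons_cons, PySem.Chars.join_singleton]
    | cons b r =>
      simp only [List.cons_append, PySem.Chars.join_cons_cons]
      rw [show b :: (r ++ [x]) = (b :: r) ++ [x] from by simp, ih (by simp)]
      simp [List.append_assoc]

theorem pv_join_snoc (a : String) (q : List String) (x : String) :
    PySem.Str.join "." ((a :: q) ++ [x]) = PySem.Str.join "." (a :: q) ++ "." ++ x := by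
  apply String.ext
  simp only [PySem.Str.toList_join, String.toList_append, List.map_append, List.map_cons,
    List.map_nil]
  rw [pv_chars_join_snoc _ _ (by simp)]

theorem pv_join3 (a b c x : String) :
    PySem.Str.join "." ([a, b, c] ++ [x]) = PySem.Str.join "." [a, b, c] ++ "." ++ x :=
  pv_join_snoc a [b, c] x

theorem pv_join2 (a b x y : String) :
    PySem.Str.join "." ([a, b] ++ [x, y]) = PySem.Str.join "." [a, b] ++ "." ++ x ++ "." ++ y := by
  rw [show ([a, b] ++ [x, y] : List String) = (a :: [b, x]) ++ [y] from by simp,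
    pv_join_snoc a [b, x] y,
    show ((a :: [b, x]) : List String) = (a :: [b]) ++ [x] from by simp,
    pv_join_snoc a [b] x]

theorem pv_join1 (a x y : String) :
    PySem.Str.join "." ([a, "0"] ++ [x, y]) = (a ++ ".0") ++ "." ++ x ++ "." ++ y := by
  rw [pv_join2]
  apply String.ext
  simp [PySem.Str.toList_join, String.toList_append, PySem.Chars.join_cons_cons,
    PySem.Chars.join_singleton]

-- one free octet: A's single append loop = B's one cartesian-extension round
theorem pv_case_k1 (base : String) (pre : List String)
    (h : ∀ x, PySem.Str.join "." (pre ++ [x]) = base ++ "." ++ x) :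
    (PySem.List.pyRange 0 256 1).foldl
        (fun ips i => ips ++ [base ++ "." ++ PySem.Int.toStr i]) [] =
      ((PySem.List.pyRange 0 1 1).foldl
          (fun combos _ => combos.flatMap
            (fun c => (PySem.List.pyRange 0 256 1).map (fun x => c ++ [PySem.Int.toStr x]))) [[]]).map
        (fun c => PySem.Str.join "." (pre ++ c)) := by
  rw [PySem.List.foldl_append_singleton_eq_map,
    show PySem.List.pyRange 0 1 1 = [(0 : Int)] from by decide]
  simp only [List.foldl_cons, List.foldl_nil, List.flatMap_cons, List.flatMap_nil,
    List.nil_append, List.append_nil, List.map_map, Function.comp_def, h]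

-- two free octets: A's nested append loops = B's two cartesian-extension rounds
theorem pv_case_k2 (base : String) (pre : List String)
    (h : ∀ x y, PySem.Str.join "." (pre ++ [x, y]) = base ++ "." ++ x ++ "." ++ y) :
    (PySem.List.pyRange 0 256 1).foldl
        (fun ips i => (PySem.List.pyRange 0 256 1).foldl
          (fun ips j => ips ++ [base ++ "." ++ PySem.Int.toStr i ++ "." ++ PySem.Int.toStr j]) ips) [] =
      ((PySem.List.pyRange 0 2 1).foldl
          (fun combos _ => combos.flatMap
            (fun c => (PySem.List.pyRange 0 256 1).map (fun x => c ++ [PySem.Int.toStr x]))) [[]]).map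
        (fun c => PySem.Str.join "." (pre ++ c)) := by
  simp only [PySem.List.foldl_append_singleton_eq_map]
  rw [PySem.List.foldl_append_eq_flatMap, List.nil_append,
    show PySem.List.pyRange 0 2 1 = [(0 : Int), 1] from by decide]
  simp only [List.foldl_cons, List.foldl_nil]
  rw [List.flatMap_singleton]
  simp only [List.nil_append]
  rw [List.map_flatMap, List.flatMap_map]
  simp only [List.map_map, Function.comp_def, List.cons_append, List.nil_append, h]

-- the two ports agree for every possible parts list
theorem pv_core (parts : List String) :
    (if parts.length ≥ 4 then [PySem.Str.join "." (PySem.List.slice parts none (some 4))]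
     else if parts.length = 3 then
       (PySem.List.pyRange 0 256 1).foldl
         (fun ips i => ips ++ [PySem.Str.join "." parts ++ "." ++ PySem.Int.toStr i]) []
     else if parts.length = 2 then
       (PySem.List.pyRange 0 256 1).foldl (fun ips i =>
         (PySem.List.pyRange 0 256 1).foldl
           (fun ips j => ips ++ [PySem.Str.join "." parts ++ "." ++ PySem.Int.toStr i ++ "." ++ PySem.Int.toStr j]) ips) []
     else if parts.length = 1 then
       (PySem.List.pyRange 0 256 1).foldl (fun ips i =>
         (PySem.List.pyRange 0 256 1).foldl
           (fun ips j => ips ++ [(PySem.List.pyGetD parts 0 "" ++ ".0") ++ "." ++ PySem.Int.toStr i ++ "." ++ PySem.Int.toStr j]) ips) []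
     else []) =
    (if parts.length ≥ 4 then [PySem.Str.join "." (PySem.List.slice parts none (some 4))]
     else if parts.isEmpty then []
     else
       let pre := if parts.length > 1 then parts else [PySem.List.pyGetD parts 0 "", "0"]
       ((PySem.List.pyRange 0 (4 - (pre.length : Int)) 1).foldl
          (fun combos _ => combos.flatMap
            (fun c => (PySem.List.pyRange 0 256 1).map (fun x => c ++ [PySem.Int.toStr x]))) [[]]).map
         (fun c => PySem.Str.join "." (pre ++ c))) := by
  match parts with
  | [] => rfl
  | [a] =>
    exact pv_case_k2 (a ++ ".0") [a, "0"] (fun x y => pv_join1 a x y)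
  | [a, b] =>
    exact pv_case_k2 (PySem.Str.join "." [a, b]) [a, b] (fun x y => pv_join2 a b x y)
  | [a, b, c] =>
    exact pv_case_k1 (PySem.Str.join "." [a, b, c]) [a, b, c] (fun x => pv_join3 a b c x)
  | a :: b :: c :: d :: rest =>
    have h4 : (a :: b :: c :: d :: rest).length ≥ 4 := by simp
    rw [if_pos h4, if_pos h4]

-- ===== VERDICT (by name: the statement is the Claim_ definition above) =====
theorem generate_ips_spec : Claim_equal_generate_ips := by
  intro base_ip _
  exact pv_core (((PySem.Str.split? (PySem.Str.strip base_ip) ".").getD []).filter (fun p => p != ""))
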